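-- pv_equiv track=rewrite | github.com/Abbas536952/Projects | MyProjects/Python Tasks/HackerRank/Marc'sCakewalk.py | marcsCakewalk
-- ===== SOURCE A (Python) =====
-- def marcsCakewalk(calorie):
--     calorie.sort() # 1 3 2 # 3 2 1
--     calorie.reverse()
--     calc = 0
--     for i in range(len(calorie)):
--         cal_count = (2 ** i) * calorie[i]
--         calc += cal_count
--     return calc
-- ===== SOURCE B (Python) =====
-- def marcsCakewalk(calorie):
--     # Different algorithm: bucket equal values with a counter dict, then walk the
--     # DISTINCT values in descending order; a run of c equal values v occupying
--     # ranks seen..seen+c-1 contributes v * (2**(seen+c) - 2**seen) in one step.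
--     # Note: unlike A, this does not mutate `calorie` in place.
--     counts = {}
--     for v in calorie:
--         counts[v] = counts.get(v, 0) + 1
--     total = 0
--     seen = 0
--     for v in sorted(counts, reverse=True):
--         c = counts[v]
--         total += v * (2 ** (seen + c) - 2 ** seen)
--         seen += c
--     return total
-- ===== Notes on version B (the rewrite author's own statement) =====
-- stated objective: alternative
-- what changed: Instead of fully sorting the list and summing 2**i * calorie[i] element by element, B builds a value->multiplicity counter dict, sorts only the distinct values descending, and charges each run of c equal values in one step as v * (2**(seen+c) - 2**seen); unlike A it does not mutate the argument in place.
import Mathlib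
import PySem

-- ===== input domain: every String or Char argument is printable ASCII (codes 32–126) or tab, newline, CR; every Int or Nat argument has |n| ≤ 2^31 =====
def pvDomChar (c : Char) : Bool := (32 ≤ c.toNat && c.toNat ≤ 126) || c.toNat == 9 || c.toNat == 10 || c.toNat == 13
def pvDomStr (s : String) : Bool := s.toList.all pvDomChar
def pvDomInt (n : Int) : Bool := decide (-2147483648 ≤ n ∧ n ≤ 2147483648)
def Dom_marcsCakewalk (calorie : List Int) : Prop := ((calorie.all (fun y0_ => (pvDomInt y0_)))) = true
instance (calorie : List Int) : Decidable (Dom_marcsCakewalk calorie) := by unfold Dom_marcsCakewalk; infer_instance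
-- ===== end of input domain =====

-- B replaces the per-element indexed sum over a fully sorted list by a counter dict
-- plus one pass over the DISTINCT values in descending order, charging each run of
-- equal values as a single block v * (2^(seen+c) - 2^seen).  Return values agree;
-- side effect differs: A sorts `calorie` in place, B does not mutate it.

-- ===== PORT A =====
-- calorie.sort(); calorie.reverse(); then sum of 2**i * calorie[i] over an index loop
def marcsCakewalk (calorie : List Int) : Int :=
  let c := (PySem.List.sorted calorie (fun x => x) false).reverse
  (PySem.List.pyRange 0 (c.length : Int) 1).foldl
    (fun acc i => acc + 2 ^ i.toNat * PySem.List.pyGetD c i 0) 0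

-- ===== PORT B =====
-- counter dict over the input, then one block per distinct value, largest first
def marcsCakewalk_alt (calorie : List Int) : Int :=
  let counts := calorie.foldl (fun d v => d.insert v (d.getD v 0 + 1)) PySem.Dict.empty
  let r := (PySem.List.sorted counts.keys (fun x => x) true).foldl
      (fun (s : Int × Int) v =>
        let c := counts.getD v 0
        (s.1 + v * (2 ^ (s.2 + c).toNat - 2 ^ s.2.toNat), s.2 + c)) ((0 : Int), (0 : Int))
  r.1

-- ===== PRECONDITION & SPEC =====
def Spec_marcsCakewalk (calorie : List Int) (out : Int) : Prop := out = marcsCakewalk_alt calorie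
instance (calorie : List Int) (out : Int) : Decidable (Spec_marcsCakewalk calorie out) := by unfold Spec_marcsCakewalk; infer_instance

-- ===== CLAIM =====
def Claim_equal_marcsCakewalk : Prop := ∀ (calorie : List Int), Dom_marcsCakewalk calorie → Spec_marcsCakewalk calorie (marcsCakewalk calorie)

-- ===== LEMMAS AND PROOFS =====

-- the position-weighted value Σ 2^k * L[k], written recursively
def pvV : List Int → Int
  | [] => 0
  | a :: t => a + 2 * pvV t

theorem pvV_append (L1 L2 : List Int) : pvV (L1 ++ L2) = pvV L1 + 2 ^ L1.length * pvV L2 := by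
  induction L1 with
  | nil => simp [pvV]
  | cons a t ih => simp [pvV, ih, pow_succ]; ring

theorem pvV_replicate (c : Nat) (v : Int) : pvV (List.replicate c v) = (2 ^ c - 1) * v := by
  induction c with
  | zero => simp [pvV]
  | succ n ih => simp [List.replicate_succ, pvV, ih, pow_succ]; ring

theorem pv_sum_eq_pvV (c : List Int) :
    ((List.range c.length).map (fun k => 2 ^ k * c.getD k 0)).sum = pvV c := by
  induction c with
  | nil => simp [pvV]
  | cons a t ih =>
    simp only [List.length_cons, List.range_succ_eq_map, List.map_cons, List.map_map,
      List.sum_cons, pvV]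
    have : (List.range t.length).map ((fun k => 2 ^ k * (a :: t).getD k 0) ∘ Nat.succ)
        = (List.range t.length).map (fun k => 2 * (2 ^ k * t.getD k 0)) := by
      apply List.map_congr_left
      intro k _
      simp [Function.comp, pow_succ]
      ring
    rw [this, List.sum_map_mul_left, ih]
    simp

-- sorted(xs, reverse=True) is sorted(xs) reversed, for the identity key on Int
theorem pv_sorted_rev_eq (xs : List Int) :
    PySem.List.sorted xs (fun x => x) true = (PySem.List.sorted xs (fun x => x) false).reverse := by
  have h : PySem.List.sorted xs (fun x => x) false
      = (PySem.List.sorted xs (fun x => x) true).reverse := by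
    apply PySem.List.sorted_id_eq_of_perm_of_pairwise
    · exact (List.reverse_perm _).trans (PySem.List.sorted_perm xs (fun x => x) true)
    · rw [List.pairwise_reverse]
      exact PySem.List.sorted_pairwise_rev xs (fun x => x)
  rw [h, List.reverse_reverse]

-- B's fold over blocks computes t + 2^s * pvV of the concatenated blocks
theorem pv_fold_blocks (cnt : Int → Nat) :
    ∀ (ks : List Int) (t : Int) (s : Nat),
    (ks.foldl (fun (p : Int × Int) v =>
        (p.1 + v * (2 ^ (p.2 + (cnt v : Int)).toNat - 2 ^ p.2.toNat), p.2 + (cnt v : Int)))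
      (t, (s : Int))).1
    = t + 2 ^ s * pvV (ks.flatMap (fun v => List.replicate (cnt v) v)) := by
  intro ks
  induction ks with
  | nil => intro t s; simp [pvV]
  | cons v ks' ih =>
    intro t s
    simp only [List.foldl_cons, List.flatMap_cons, pvV_append]
    have hcast : (s : Int) + (cnt v : Int) = ((s + cnt v : Nat) : Int) := by push_cast; ring
    rw [hcast, ih]
    simp only [Int.toNat_natCast, List.length_replicate, pvV_replicate]
    rw [pow_add]
    ring

-- summing count w over the per-distinct-value blocks gives count w
theorem pv_sum_count_blocks (xs : List Int) (w : Int) :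
    ∀ (ks : List Int), ks.Nodup → (w ∈ xs → w ∈ ks) → (∀ v ∈ ks, v ∈ xs) →
    (ks.map (fun v => List.count w (List.replicate (xs.count v) v))).sum = xs.count w := by
  intro ks
  induction ks with
  | nil =>
    intro _ hw _
    simp only [List.map_nil, List.sum_nil]
    by_cases h : w ∈ xs
    · exact absurd (hw h) (List.not_mem_nil)
    · exact (List.count_eq_zero.mpr h).symm
  | cons a ks' ih =>
    intro hnd hw hmem
    simp only [List.map_cons, List.sum_cons]
    by_cases haw : a = w
    · subst haw
      have hrest : (ks'.map (fun v => List.count a (List.replicate (xs.count v) v))).sum = 0 := by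
        apply List.sum_eq_zero
        intro x hx
        simp only [List.mem_map] at hx
        obtain ⟨v, hv, rfl⟩ := hx
        have hva : v ≠ a := fun h => (List.nodup_cons.mp hnd).1 (h ▸ hv)
        simp [List.count_replicate, hva]
      rw [hrest, List.count_replicate_self, add_zero]
    · have h0 : List.count w (List.replicate (xs.count a) a) = 0 := by
        simp [List.count_replicate, haw]
      rw [h0, zero_add]
      apply ih (List.nodup_cons.mp hnd).2
      · intro hwxs
        rcases List.mem_cons.mp (hw hwxs) with h | h
        · exact absurd h.symm haw
        · exact h
      · exact fun v hv => hmem v (List.mem_cons_of_mem _ hv)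

-- the descending distinct values, each replicated by its multiplicity, IS the
-- descending sorted list
theorem pv_flat_eq_sorted (xs : List Int) :
    (PySem.List.sorted (PySem.Set.ofList xs) (fun x => x) true).flatMap
      (fun v => List.replicate (xs.count v) v)
    = PySem.List.sorted xs (fun x => x) true := by
  have hperm_keys : (PySem.List.sorted (PySem.Set.ofList xs) (fun x => x) true).Perm
      (PySem.Set.ofList xs) := PySem.List.sorted_perm _ _ _
  have hnd : (PySem.List.sorted (PySem.Set.ofList xs) (fun x => x) true).Nodup :=
    (hperm_keys.nodup_iff).mpr (PySem.Set.nodup_ofList xs)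
  apply PySem.List.eq_of_perm_of_pairwise_le_of_injective (key := fun x : Int => -x)
    neg_injective
  · -- permutation: both sides are permutations of xs
    refine List.Perm.trans ?_ (PySem.List.sorted_perm xs (fun x => x) true).symm
    rw [List.perm_iff_count]
    intro w
    rw [List.count_flatMap]
    apply pv_sum_count_blocks xs w _ hnd
    · intro hwxs
      exact hperm_keys.mem_iff.mpr ((PySem.Set.mem_ofList xs w).mpr hwxs)
    · intro v hv
      exact (PySem.Set.mem_ofList xs v).mp (hperm_keys.mem_iff.mp hv)
  · -- the flattened blocks are descending
    rw [List.flatMap_def, List.pairwise_flatten]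
    constructor
    · intro l hl
      simp only [List.mem_map] at hl
      obtain ⟨v, _, rfl⟩ := hl
      exact List.pairwise_replicate.mpr (Or.inr le_rfl)
    · rw [List.pairwise_map]
      have hdesc := PySem.List.sorted_pairwise_rev (PySem.Set.ofList xs) (fun x : Int => x)
      have hne : List.Pairwise (fun a b : Int => a ≠ b)
          (PySem.List.sorted (PySem.Set.ofList xs) (fun x => x) true) := hnd
      have hstrict : List.Pairwise (fun a b : Int => b < a)
          (PySem.List.sorted (PySem.Set.ofList xs) (fun x => x) true) :=
        (hne.and hdesc).imp (fun h => lt_of_le_of_ne h.2 (Ne.symm h.1))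
      refine List.Pairwise.imp ?_ hstrict
      intro a b hba x hx y hy
      rw [List.eq_of_mem_replicate hx, List.eq_of_mem_replicate hy]
      omega
  · -- the descending sorted list is descending
    exact List.Pairwise.imp (fun h => by omega) (PySem.List.sorted_pairwise_rev xs (fun x : Int => x))

-- ===== VERDICT =====
theorem marcsCakewalk_spec : Claim_equal_marcsCakewalk := by
  intro calorie _
  unfold Spec_marcsCakewalk marcsCakewalk marcsCakewalk_alt
  dsimp only
  rw [PySem.Dict.foldl_insert_getD_add_one_eq_counter, PySem.Dict.keys_counter]
  rw [← pv_sorted_rev_eq]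
  set c := PySem.List.sorted calorie (fun x => x) true with hc
  rw [PySem.List.pyRange_one, List.foldl_map]
  simp only [zero_add, sub_zero, Int.toNat_natCast, PySem.List.pyGetD_natCast]
  rw [PySem.List.foldl_add, zero_add, pv_sum_eq_pvV]
  have hstep : ∀ (p : Int × Int) (v : Int), v ∈ PySem.List.sorted (PySem.Set.ofList calorie) (fun x => x) true →
      (p.1 + v * (2 ^ (p.2 + (PySem.Dict.counter calorie).getD v 0).toNat - 2 ^ p.2.toNat),
        p.2 + (PySem.Dict.counter calorie).getD v 0)
      = (p.1 + v * (2 ^ (p.2 + ((calorie.count v : Nat) : Int)).toNat - 2 ^ p.2.toNat),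
        p.2 + ((calorie.count v : Nat) : Int)) := by
    intro p v _
    rw [PySem.Dict.getD_counter]
  have hcongr := PySem.List.foldl_congr_mem _ _ _ ((0 : Int), (0 : Int)) hstep
  rw [hcongr]
  have hfb := pv_fold_blocks (fun v => calorie.count v)
    (PySem.List.sorted (PySem.Set.ofList calorie) (fun x => x) true) 0 0
  simp only [Nat.cast_zero, pow_zero, one_mul, zero_add] at hfb
  rw [hfb, pv_flat_eq_sorted]
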